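-- pv_equiv track=rewrite | github.com/creggian/creggian-python | creggian/bed.py | count_overlaps
-- ===== SOURCE A (Python) =====
-- def count_overlaps(qstart, qend, sstart, send):
--     if len(qstart) != len(qend):
--         raise Exception('countOverlaps ERROR !')
--
--     if len(sstart) != len(send):
--         raise Exception('countOverlaps ERROR !')
--
--     query_co = []
--     for idx in range(0, len(qstart)):
--         query_start = qstart[idx]
--         query_end = qend[idx]
--
--         i_co = 0
--         for jdx in range(0, len(sstart)):
--             subject_start = sstart[jdx]
--             subject_end = send[jdx]
--
--             if query_end >= subject_start and subject_end >= query_start: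
--                 i_co += 1
--
--         query_co += [i_co]
--
--     return query_co
-- ===== SOURCE B (Python) =====
-- def _build(n):
--     if n <= 1:
--         return (0,)
--     h = n // 2
--     return (0, h, _build(h), _build(n - h))
--
-- def _insert(t, i):
--     if len(t) == 1:
--         return (t[0] + 1,)
--     tot, h, l, r = t
--     if i < h:
--         return (tot + 1, h, _insert(l, i), r)
--     return (tot + 1, h, l, _insert(r, i - h))
--
-- def _query(t, k):
--     if k <= 0:
--         return 0
--     if len(t) == 1:
--         return t[0]
--     tot, h, l, r = t
--     if k <= h:
--         return _query(l, k)
--     return l[0] + _query(r, k - h)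
--
-- def count_overlaps(qstart, qend, sstart, send):
--     if len(qstart) != len(qend):
--         raise Exception('countOverlaps ERROR !')
--     if len(sstart) != len(send):
--         raise Exception('countOverlaps ERROR !')
--     Q = len(qstart)
--     S = len(sstart)
--     vs = sorted(send)
--
--     # rank[j] = number of subject ends strictly below send[j]
--     rank = [0] * S
--     p = 0
--     for j, se in sorted(enumerate(send), key=lambda e: e[1]):
--         while p < S and vs[p] < se:
--             p += 1
--         rank[j] = p
--
--     # thr[i] = number of subject ends strictly below qstart[i]
--     thr = [0] * Q
--     p = 0
--     for i, qs in sorted(enumerate(qstart), key=lambda e: e[1]):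
--         while p < S and vs[p] < qs:
--             p += 1
--         thr[i] = p
--
--     subj = sorted(zip(sstart, rank), key=lambda e: e[0])
--
--     tree = _build(S)
--     counts = [0] * Q
--     sp = 0
--     for i, qe in sorted(enumerate(qend), key=lambda e: e[1]):
--         while sp < S and subj[sp][0] <= qe:
--             tree = _insert(tree, subj[sp][1])
--             sp += 1
--         counts[i] = sp - _query(tree, thr[i])
--     return counts
-- ===== Notes on version B (the rewrite author's own statement) =====
-- stated objective: faster
-- what changed: Replaced the all-pairs double loop by an offline sweep: subjects sorted by start are inserted (as ranks of their ends) into a binary count tree while queries, processed in order of their end, read each answer as #(sstart<=qend) minus a prefix-count of subject ends below qstart.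
import Mathlib
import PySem

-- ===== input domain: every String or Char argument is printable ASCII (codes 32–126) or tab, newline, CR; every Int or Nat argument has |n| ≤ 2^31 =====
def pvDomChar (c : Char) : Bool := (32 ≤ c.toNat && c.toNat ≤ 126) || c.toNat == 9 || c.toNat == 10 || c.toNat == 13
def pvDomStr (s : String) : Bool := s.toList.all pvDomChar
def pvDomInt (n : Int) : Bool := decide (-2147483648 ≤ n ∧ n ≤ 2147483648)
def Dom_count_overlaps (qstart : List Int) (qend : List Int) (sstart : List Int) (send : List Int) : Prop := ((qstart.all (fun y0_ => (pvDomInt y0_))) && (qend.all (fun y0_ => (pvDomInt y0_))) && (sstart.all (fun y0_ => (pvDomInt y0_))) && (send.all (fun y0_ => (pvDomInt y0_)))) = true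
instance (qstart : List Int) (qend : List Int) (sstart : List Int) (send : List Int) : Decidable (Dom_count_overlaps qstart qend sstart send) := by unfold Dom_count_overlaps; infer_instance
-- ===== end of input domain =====

-- B replaces A's all-pairs double loop by an offline sweep (sort + binary count tree),
-- O((Q+S) log (Q+S)) instead of O(Q*S); objective: faster (asymptotic).

-- ===== PORT A =====
def count_overlaps (qstart : List Int) (qend : List Int) (sstart : List Int) (send : List Int) : List Int :=
  if qstart.length ≠ qend.length then [] else  -- Python raises here; excluded by Pre_
  if sstart.length ≠ send.length then [] else  -- Python raises here; excluded by Pre_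
  (PySem.List.pyRange 0 (qstart.length : Int) 1).foldl
    (fun query_co idx =>
      let query_start := PySem.List.pyGetD qstart idx 0
      let query_end := PySem.List.pyGetD qend idx 0
      let i_co :=
        (PySem.List.pyRange 0 (sstart.length : Int) 1).foldl
          (fun i_co jdx =>
            let subject_start := PySem.List.pyGetD sstart jdx 0
            let subject_end := PySem.List.pyGetD send jdx 0
            if query_end ≥ subject_start ∧ subject_end ≥ query_start then i_co + 1 else i_co)
          (0 : Int)
      query_co ++ [i_co])
    []

-- ===== PORT B =====
-- Source B's binary count tree: Python tuple (cnt,) is `leaf`, (tot, h, l, r) is `node`.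
inductive PvTree where
  | leaf (c : Int)
  | node (tot : Int) (lsz : Int) (l : PvTree) (r : PvTree)
deriving Repr

-- _build(n)
def pvBuild (n : Nat) : PvTree :=
  if n ≤ 1 then .leaf 0
  else .node 0 ((n / 2 : Nat) : Int) (pvBuild (n / 2)) (pvBuild (n - n / 2))
decreasing_by all_goals omega

-- _insert(t, i)
def pvInsert : PvTree → Int → PvTree
  | .leaf c, _ => .leaf (c + 1)
  | .node tot h l r, i =>
      if i < h then .node (tot + 1) h (pvInsert l i) r
      else .node (tot + 1) h l (pvInsert r (i - h))

-- l[0] of a tree tuple: its total-count field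
def pvTot : PvTree → Int
  | .leaf c => c
  | .node tot _ _ _ => tot

-- _query(t, k)
def pvQuery (t : PvTree) (k : Int) : Int :=
  if k ≤ 0 then 0
  else match t with
    | .leaf c => c
    | .node _ h l r => if k ≤ h then pvQuery l k else pvTot l + pvQuery r (k - h)

-- the `while p < S and vs[p] < x: p += 1` loop (p is a nonnegative Python int: Nat)
def pvAdvance (vs : List Int) (x : Int) (p : Nat) : Nat :=
  if h : p < vs.length ∧ vs.getD p 0 < x then pvAdvance vs x (p + 1) else p
termination_by vs.length - p
decreasing_by omega

-- the `while sp < S and subj[sp][0] <= qe: tree = _insert(...); sp += 1` loop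
def pvSweep (subj : List (Int × Int)) (x : Int) (sp : Nat) (tree : PvTree) : Nat × PvTree :=
  if h : sp < subj.length ∧ (subj.getD sp (0, 0)).1 ≤ x then
    pvSweep subj x (sp + 1) (pvInsert tree (subj.getD sp (0, 0)).2)
  else (sp, tree)
termination_by subj.length - sp
decreasing_by omega

def count_overlaps_alt (qstart : List Int) (qend : List Int) (sstart : List Int) (send : List Int) : List Int :=
  if qstart.length ≠ qend.length then [] else  -- Python raises here; excluded by Pre_
  if sstart.length ≠ send.length then [] else  -- Python raises here; excluded by Pre_
  let S := sstart.length
  let Q := qstart.length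
  let vs := PySem.List.sorted send (fun v => v) false
  let rank := ((PySem.List.sorted (PySem.List.enumerate send 0) (fun e => e.2) false).foldl
      (fun (st : Nat × List Int) e =>
        let p := pvAdvance vs e.2 st.1
        (p, st.2.set e.1.toNat (p : Int)))
      (0, List.replicate S (0 : Int))).2
  let thr := ((PySem.List.sorted (PySem.List.enumerate qstart 0) (fun e => e.2) false).foldl
      (fun (st : Nat × List Int) e =>
        let p := pvAdvance vs e.2 st.1
        (p, st.2.set e.1.toNat (p : Int)))
      (0, List.replicate Q (0 : Int))).2
  let subj := PySem.List.sorted (sstart.zip rank) (fun e => e.1) false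
  let fin := (PySem.List.sorted (PySem.List.enumerate qend 0) (fun e => e.2) false).foldl
      (fun (st : Nat × PvTree × List Int) e =>
        let r := pvSweep subj e.2 st.1 st.2.1
        (r.1, r.2, st.2.2.set e.1.toNat ((r.1 : Int) - pvQuery r.2 (thr.getD e.1.toNat 0))))
      (0, pvBuild S, List.replicate Q (0 : Int))
  fin.2.2

-- ===== PRECONDITION & SPEC =====
-- Pre_ excludes exactly the inputs on which A raises its length-mismatch Exception.
def Pre_count_overlaps (qstart : List Int) (qend : List Int) (sstart : List Int) (send : List Int) : Prop :=
  qstart.length = qend.length ∧ sstart.length = send.length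
instance (qstart : List Int) (qend : List Int) (sstart : List Int) (send : List Int) : Decidable (Pre_count_overlaps qstart qend sstart send) := by unfold Pre_count_overlaps; infer_instance

def pvWitness_count_overlaps : List Int × List Int × List Int × List Int :=
  ([0, 5], [4, 9], [1, -3], [6, 2])

def Spec_count_overlaps (qstart : List Int) (qend : List Int) (sstart : List Int) (send : List Int) (out : List Int) : Prop := out = count_overlaps_alt qstart qend sstart send
instance (qstart : List Int) (qend : List Int) (sstart : List Int) (send : List Int) (out : List Int) : Decidable (Spec_count_overlaps qstart qend sstart send out) := by unfold Spec_count_overlaps; infer_instance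

-- ===== CLAIM (what is proved, stated in full; the proofs are below) =====
def Claim_equal_count_overlaps : Prop := ∀ (qstart : List Int) (qend : List Int) (sstart : List Int) (send : List Int), Dom_count_overlaps qstart qend sstart send → Pre_count_overlaps qstart qend sstart send → Spec_count_overlaps qstart qend sstart send (count_overlaps qstart qend sstart send)

-- ===== LEMMAS AND PROOFS =====

-- ---- the mathematical value both programs compute ----
def pvCnt (q : Int × Int) (sp : List (Int × Int)) : Nat :=
  sp.countP (fun s => decide (q.2 ≥ s.1 ∧ s.2 ≥ q.1))

-- ---- A-side characterisation ----
theorem pv_map_pyRange_zip (xs ys : List Int) (h : xs.length = ys.length) :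
    (PySem.List.pyRange 0 (xs.length : Int) 1).map
      (fun j => (PySem.List.pyGetD xs j 0, PySem.List.pyGetD ys j 0)) = xs.zip ys := by
  apply List.ext_getElem
  · simp [PySem.List.length_pyRange_one, h]
  · intro i h1 h2
    have hx : i < xs.length := by
      simpa [PySem.List.length_pyRange_one] using h1
    have hy : i < ys.length := h ▸ hx
    simp [PySem.List.getElem_pyRange_one, hx, hy]

theorem pv_A_eq (qstart qend sstart send : List Int)
    (hq : qstart.length = qend.length) (hs : sstart.length = send.length) :
    count_overlaps qstart qend sstart send
      = (qstart.zip qend).map (fun q => ((pvCnt q (sstart.zip send) : Nat) : Int)) := by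
  unfold count_overlaps
  rw [if_neg (by omega), if_neg (by omega)]
  have hinner : ∀ q : Int × Int,
      (PySem.List.pyRange 0 (sstart.length : Int) 1).foldl
        (fun i_co jdx =>
          if q.2 ≥ PySem.List.pyGetD sstart jdx 0 ∧ PySem.List.pyGetD send jdx 0 ≥ q.1
          then i_co + 1 else i_co) (0 : Int)
      = ((pvCnt q (sstart.zip send) : Nat) : Int) := by
    intro q
    rw [PySem.List.foldl_ite_add_one]
    have : (PySem.List.pyRange 0 (sstart.length : Int) 1).countP
        (fun jdx => decide (q.2 ≥ PySem.List.pyGetD sstart jdx 0 ∧ PySem.List.pyGetD send jdx 0 ≥ q.1))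
        = pvCnt q (sstart.zip send) := by
      unfold pvCnt
      rw [← pv_map_pyRange_zip sstart send hs, List.countP_map]
      rfl
    rw [this]; ring
  calc (PySem.List.pyRange 0 (qstart.length : Int) 1).foldl
        (fun query_co idx =>
          let query_start := PySem.List.pyGetD qstart idx 0
          let query_end := PySem.List.pyGetD qend idx 0
          let i_co :=
            (PySem.List.pyRange 0 (sstart.length : Int) 1).foldl
              (fun i_co jdx =>
                let subject_start := PySem.List.pyGetD sstart jdx 0
                let subject_end := PySem.List.pyGetD send jdx 0
                if query_end ≥ subject_start ∧ subject_end ≥ query_start then i_co + 1 else i_co)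
              (0 : Int)
          query_co ++ [i_co]) []
      = (PySem.List.pyRange 0 (qstart.length : Int) 1).map
          (fun idx => ((pvCnt (PySem.List.pyGetD qstart idx 0, PySem.List.pyGetD qend idx 0)
                        (sstart.zip send) : Nat) : Int)) := by
        rw [PySem.List.foldl_append_singleton_eq_map]
        simp only [List.nil_append]
        apply List.map_congr_left
        intro idx _
        exact hinner (PySem.List.pyGetD qstart idx 0, PySem.List.pyGetD qend idx 0)
    _ = (qstart.zip qend).map (fun q => ((pvCnt q (sstart.zip send) : Nat) : Int)) := by
        rw [← pv_map_pyRange_zip qstart qend hq, List.map_map]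
        rfl

-- ---- generic facts about sorted lists and counting ----

theorem pv_sorted_countP {α : Type} (key : α → Int) (l : List α)
    (hl : l.Pairwise (fun a b => key a ≤ key b)) (p : α → Bool)
    (hmono : ∀ a b, key a ≤ key b → p b = true → p a = true) :
    ∀ q (hq : q < l.length), (p l[q] = true ↔ q < l.countP p) := by
  induction l with
  | nil => intro q hq; simp at hq
  | cons a t ih =>
    have ha := (List.pairwise_cons.mp hl).1
    have ht := (List.pairwise_cons.mp hl).2
    intro q hq
    cases q with
    | zero =>
      simp only [List.getElem_cons_zero, List.countP_cons]
      constructor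
      · intro hpa; simp [hpa]
      · intro hlt
        by_contra hna
        have hzero : t.countP p = 0 := by
          apply List.countP_eq_zero.mpr
          intro b hb hpb
          exact hna (hmono a b (ha b hb) hpb)
        simp [hzero, hna] at hlt
    | succ q =>
      simp only [List.getElem_cons_succ, List.countP_cons]
      have hq' : q < t.length := by simpa using hq
      have iht := ih ht q hq'
      by_cases hpa : p a = true
      · simpa [hpa] using iht
      · have hnt : ¬ p t[q] = true := fun hpt => hpa (hmono a t[q] (ha _ (List.getElem_mem hq')) hpt)
        constructor
        · intro h; exact absurd h hnt
        · intro h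
          simp [Bool.eq_false_iff.mpr hpa] at h
          exact absurd (iht.mpr (by omega)) hnt

theorem pv_filter_eq_take {α : Type} (key : α → Int) (l : List α)
    (hl : l.Pairwise (fun a b => key a ≤ key b)) (p : α → Bool)
    (hmono : ∀ a b, key a ≤ key b → p b = true → p a = true) :
    l.filter p = l.take (l.countP p) := by
  induction l with
  | nil => rfl
  | cons a t ih =>
    have ha := (List.pairwise_cons.mp hl).1
    have ht := (List.pairwise_cons.mp hl).2
    by_cases hpa : p a = true
    · simp only [List.filter_cons, List.countP_cons, hpa, if_pos]
      simp [ih ht]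
    · have hzero : t.countP p = 0 := by
        apply List.countP_eq_zero.mpr
        intro b hb hpb
        exact hpa (hmono a b (ha b hb) hpb)
      have hfil : t.filter p = [] := List.filter_eq_nil_iff.mpr (by
        intro b hb hpb
        exact hpa (hmono a b (ha b hb) hpb))
      simp [Bool.eq_false_iff.mpr hpa, hzero, hfil]

theorem pv_rank_lt (l : List Int) (a b : Int) (ha : a ∈ l) :
    (l.countP (fun v => decide (v < a)) < l.countP (fun v => decide (v < b))) ↔ a < b := by
  constructor
  · intro h
    by_contra hba
    rw [not_lt] at hba
    have := List.countP_mono_left (l := l) (p := fun v => decide (v < b)) (q := fun v => decide (v < a))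
      (fun v _ hv => by simp at hv ⊢; omega)
    omega
  · intro hab
    induction l with
    | nil => cases ha
    | cons x t ih =>
      simp only [List.countP_cons]
      rcases List.mem_cons.mp ha with rfl | hmem
      · have h1 : (decide (a < b) : Bool) = true := by simp; omega
        have hle := List.countP_mono_left (l := t) (p := fun v => decide (v < a)) (q := fun v => decide (v < b))
          (fun v _ hv => by simp at hv ⊢; omega)
        simp [h1]; omega
      · have := ih hmem
        have hmon : (if decide (x < a) = true then 1 else 0) ≤ (if decide (x < b) = true then 1 else 0) := by
          split <;> split <;> simp_all
          omega
        omega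

theorem pvAdvance_spec (vs : List Int) (x : Int)
    (hvs : vs.Pairwise (· ≤ ·)) :
    ∀ (p : Nat), p ≤ vs.length →
    (∀ q (hq : q < vs.length), q < p → vs[q] < x) →
    pvAdvance vs x p = vs.countP (fun v => decide (v < x)) := by
  have hcore := pv_sorted_countP (fun v => v) vs hvs (fun v => decide (v < x))
    (fun a b hab hb => by simp at hab hb ⊢; omega)
  have hstop : ∀ (p : Nat), p ≤ vs.length →
      (∀ q (hq : q < vs.length), q < p → vs[q] < x) →
      ¬ (p < vs.length ∧ vs.getD p 0 < x) →
      p = vs.countP (fun v => decide (v < x)) := by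
    intro p hp hlt hns
    have hle : p ≤ vs.countP (fun v => decide (v < x)) := by
      rcases Nat.eq_zero_or_pos p with rfl | hpos
      · omega
      · have h1 : p - 1 < vs.length := by omega
        have := (hcore (p - 1) h1).mp (by simp [hlt (p-1) h1 (by omega)])
        omega
    rcases Nat.lt_or_ge p vs.length with hplen | hplen
    · by_contra hne
      have hlt2 : p < vs.countP (fun v => decide (v < x)) := by omega
      have := (hcore p hplen).mpr hlt2
      rw [List.getD_eq_getElem vs 0 hplen] at hns
      simp at this hns
      omega
    · have : vs.countP (fun v => decide (v < x)) ≤ vs.length := List.countP_le_length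
      omega
  have H : ∀ (n p : Nat), vs.length - p ≤ n → p ≤ vs.length →
      (∀ q (hq : q < vs.length), q < p → vs[q] < x) →
      pvAdvance vs x p = vs.countP (fun v => decide (v < x)) := by
    intro n
    induction n with
    | zero =>
      intro p hn hp hlt
      rw [pvAdvance]
      rw [dif_neg (by omega)]
      exact hstop p hp hlt (by omega)
    | succ n ih =>
      intro p hn hp hlt
      rw [pvAdvance]
      by_cases hc : p < vs.length ∧ vs.getD p 0 < x
      · rw [dif_pos hc]
        apply ih (p + 1) (by omega) (by omega)
        intro q hq hqp
        rcases Nat.lt_or_ge q p with h | h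
        · exact hlt q hq h
        · have : q = p := by omega
          subst this
          rw [List.getD_eq_getElem vs 0 hc.1] at hc
          exact hc.2
      · rw [dif_neg hc]
        exact hstop p hp hlt hc
  intro p hp hlt
  exact H (vs.length - p) p (by omega) hp hlt

theorem pv_scatter (vs : List Int) (hvs : vs.Pairwise (· ≤ ·)) :
    ∀ (items : List (Int × Int)) (p : Nat) (arr : List Int),
      items.Pairwise (fun a b => a.2 ≤ b.2) →
      p ≤ vs.length →
      (∀ q (hq : q < vs.length), q < p → ∀ b ∈ items, vs[q] < b.2) →
      (items.foldl (fun (st : Nat × List Int) e =>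
          let p' := pvAdvance vs e.2 st.1
          (p', st.2.set e.1.toNat (p' : Int))) (p, arr)).2
        = items.foldl (fun a e => a.set e.1.toNat ((vs.countP (fun v => decide (v < e.2)) : Int))) arr := by
  have hcore := fun y => pv_sorted_countP (fun v => v) vs hvs (fun v => decide (v < y))
    (fun a b hab hb => by simp at hab hb ⊢; omega)
  intro items
  induction items with
  | nil => intro p arr _ _ _; rfl
  | cons e rest ih =>
    intro p arr hpair hp hpre
    simp only [List.foldl_cons]
    have hpe := pvAdvance_spec vs e.2 hvs p hp
      (fun q hq hqp => hpre q hq hqp e (List.mem_cons_self))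
    rw [hpe]
    apply ih (vs.countP (fun v => decide (v < e.2))) _ (List.pairwise_cons.mp hpair).2
      List.countP_le_length
    intro q hq hqc b hb
    have h1 : vs[q] < e.2 := by have := ((hcore e.2) q hq).mpr hqc; simpa using this
    have h2 : e.2 ≤ b.2 := (List.pairwise_cons.mp hpair).1 b hb
    omega

theorem pv_foldl_set_length {α : Type} (items : List α) (g : α → Nat) (f : α → Int) (arr : List Int) :
    (items.foldl (fun a e => a.set (g e) (f e)) arr).length = arr.length := by
  induction items generalizing arr with
  | nil => rfl
  | cons e rest ih => simpa using ih (arr.set (g e) (f e))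

theorem pv_foldl_set_getElem_of_ne {α : Type} (items : List α) (g : α → Nat) (f : α → Int)
    (arr : List Int) (i : Nat) (hni : ∀ e ∈ items, g e ≠ i) :
    (items.foldl (fun a e => a.set (g e) (f e)) arr)[i]? = arr[i]? := by
  induction items generalizing arr with
  | nil => rfl
  | cons e rest ih =>
    rw [List.foldl_cons, ih _ (fun x hx => hni x (List.mem_cons_of_mem _ hx)),
      List.getElem?_set_ne (hni e (List.mem_cons_self))]

theorem pv_foldl_set_getElem {α : Type} (items : List α) (g : α → Nat) (f : α → Int)
    (arr : List Int) (e₀ : α) (he : e₀ ∈ items) (hi : g e₀ < arr.length)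
    (hnd : items.Pairwise (fun a b => g a ≠ g b)) :
    (items.foldl (fun a e => a.set (g e) (f e)) arr)[g e₀]? = some (f e₀) := by
  induction items generalizing arr with
  | nil => cases he
  | cons e rest ih =>
    rw [List.foldl_cons]
    rcases List.mem_cons.mp he with rfl | hmem
    · rw [pv_foldl_set_getElem_of_ne rest g f _ _ (fun x hx => (List.pairwise_cons.mp hnd).1 x hx |>.symm)]
      exact List.getElem?_set_self (by simpa using hi)
    · exact ih (arr.set (g e) (f e)) hmem (by simpa using hi) (List.pairwise_cons.mp hnd).2

theorem pv_sorted_enum_nodup (xs : List Int) :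
    (PySem.List.sorted (PySem.List.enumerate xs 0) (fun e => e.2) false).Pairwise
      (fun a b => a.1.toNat ≠ b.1.toNat) := by
  rw [List.Perm.pairwise_iff (fun h => Ne.symm h) (PySem.List.sorted_perm _ _ _)]
  rw [List.pairwise_iff_getElem]
  intro i j hi hj hij
  rw [PySem.List.getElem_enumerate, PySem.List.getElem_enumerate]
  simp
  omega

theorem pv_rankArr_spec (base vs xs : List Int) (L : Nat) (hperm : vs.Perm base)
    (hvs : vs.Pairwise (· ≤ ·)) (j : Nat) (hj : j < xs.length) (hjL : j < L) :
    ((PySem.List.sorted (PySem.List.enumerate xs 0) (fun e => e.2) false).foldl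
        (fun (st : Nat × List Int) e =>
          let p := pvAdvance vs e.2 st.1
          (p, st.2.set e.1.toNat (p : Int)))
        (0, List.replicate L (0 : Int))).2[j]?
      = some ((base.countP (fun v => decide (v < xs[j])) : Nat) : Int) := by
  have hpair : (PySem.List.sorted (PySem.List.enumerate xs 0) (fun e => e.2) false).Pairwise
      (fun a b => a.2 ≤ b.2) := by
    have := PySem.List.sorted_pairwise (xs := PySem.List.enumerate xs 0) (key := fun e => e.2)
    simpa using this
  rw [pv_scatter vs hvs _ 0 _ hpair (by omega) (by intro q hq h0; omega)]
  have he : ((j : Int), xs[j]) ∈ PySem.List.sorted (PySem.List.enumerate xs 0) (fun e => e.2) false := by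
    rw [PySem.List.mem_sorted]
    rw [PySem.List.mem_enumerate_iff]
    exact ⟨j, hj, by simp⟩
  have := pv_foldl_set_getElem
    (PySem.List.sorted (PySem.List.enumerate xs 0) (fun e => e.2) false)
    (fun e => e.1.toNat)
    (fun e => ((vs.countP (fun v => decide (v < e.2)) : Nat) : Int))
    (List.replicate L (0 : Int))
    ((j : Int), xs[j]) he (by simpa using hjL) (pv_sorted_enum_nodup xs)
  simp only at this
  rw [show ((j : Int), xs[j]).1.toNat = j by simp] at this
  rw [this]
  rw [List.Perm.countP_eq _ hperm]

-- ---- tree well-formedness and counting ----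

def pvLeaves : PvTree → Nat
  | .leaf _ => 1
  | .node _ _ l r => pvLeaves l + pvLeaves r

def pvCnts : PvTree → List Int
  | .leaf c => [c]
  | .node _ _ l r => pvCnts l ++ pvCnts r

def pvWF : PvTree → Prop
  | .leaf _ => True
  | .node tot h l r => pvWF l ∧ pvWF r ∧ h = (pvLeaves l : Int) ∧ tot = (pvCnts l).sum + (pvCnts r).sum

theorem pvCnts_length (t : PvTree) : (pvCnts t).length = pvLeaves t := by
  induction t with
  | leaf c => simp [pvCnts, pvLeaves]
  | node tot h l r ihl ihr => simp [pvCnts, pvLeaves, ihl, ihr]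

theorem pvBuild_spec (n : Nat) : pvWF (pvBuild n) ∧ pvCnts (pvBuild n) = List.replicate (max n 1) 0 := by
  induction n using Nat.strong_induction_on with
  | _ n ih =>
    rw [pvBuild]
    by_cases h : n ≤ 1
    · rw [if_pos h]
      constructor
      · trivial
      · have : max n 1 = 1 := by omega
        simp [pvCnts, this]
    · rw [if_neg h]
      have ihl := ih (n / 2) (by omega)
      have ihr := ih (n - n / 2) (by omega)
      have hl1 : max (n / 2) 1 = n / 2 := by omega
      have hr1 : max (n - n / 2) 1 = n - n / 2 := by omega
      rw [hl1] at ihl; rw [hr1] at ihr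
      constructor
      · refine ⟨ihl.1, ihr.1, ?_, ?_⟩
        · rw [← pvCnts_length, ihl.2]; simp
        · rw [ihl.2, ihr.2]; simp
      · show pvCnts (.node 0 _ (pvBuild (n/2)) (pvBuild (n - n/2))) = _
        rw [pvCnts, ihl.2, ihr.2, ← List.replicate_add]
        congr 1
        omega

theorem pvTot_eq (t : PvTree) (hwf : pvWF t) : pvTot t = (pvCnts t).sum := by
  cases t with
  | leaf c => simp [pvTot, pvCnts]
  | node tot h l r => simp [pvTot, pvCnts, hwf.2.2.2]

theorem pvQuery_spec (t : PvTree) (hwf : pvWF t) (k : Int) :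
    pvQuery t k = ((pvCnts t).take k.toNat).sum := by
  induction t generalizing k with
  | leaf c =>
    rw [pvQuery]
    by_cases hk : k ≤ 0
    · rw [if_pos hk]
      have : k.toNat = 0 := by omega
      simp [pvCnts, this]
    · rw [if_neg hk]
      have h1 : ([c] : List Int).length ≤ k.toNat := by simp; omega
      simp [pvCnts, List.take_of_length_le h1]
  | node tot h l r ihl ihr =>
    obtain ⟨hwl, hwr, hh, _⟩ := hwf
    subst hh
    have hlen : (pvCnts l).length = pvLeaves l := pvCnts_length l
    rw [pvQuery]
    by_cases hk : k ≤ 0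
    · rw [if_pos hk]
      have : k.toNat = 0 := by omega
      simp [this]
    · rw [if_neg hk]
      show (if k ≤ (pvLeaves l : Int) then pvQuery l k else pvTot l + pvQuery r (k - (pvLeaves l : Int))) = ((pvCnts l ++ pvCnts r).take k.toNat).sum
      rw [List.take_append, List.sum_append]
      by_cases hkh : k ≤ (pvLeaves l : Int)
      · rw [if_pos hkh]
        have : k.toNat - (pvCnts l).length = 0 := by omega
        rw [this]
        simp [ihl hwl k]
      · rw [if_neg hkh]
        have h1 : (pvCnts l).length ≤ k.toNat := by omega
        have h2 : (k - (pvLeaves l : Int)).toNat = k.toNat - (pvCnts l).length := by omega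
        rw [List.take_of_length_le h1, pvTot_eq l hwl, ihr hwr (k - (pvLeaves l : Int)), h2]

theorem pv_sum_take_set (l : List Int) (j : Nat) (hj : j < l.length) (n : Nat) :
    ((l.set j (l[j] + 1)).take n).sum = (l.take n).sum + if j < n then 1 else 0 := by
  induction l generalizing j n with
  | nil => simp at hj
  | cons a t ih =>
    cases j with
    | zero =>
      cases n with
      | zero => simp
      | succ m => simp [List.take_succ_cons]; ring
    | succ j =>
      cases n with
      | zero => simp
      | succ m =>
        simp only [List.set_cons_succ, List.take_succ_cons, List.sum_cons,
          List.getElem_cons_succ]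
        rw [ih j (by simpa using hj) m]
        by_cases hjm : j < m
        all_goals simp [hjm]
        all_goals omega

theorem pv_sum_set_add_one (l : List Int) (j : Nat) (hj : j < l.length) :
    (l.set j (l.getD j 0 + 1)).sum = l.sum + 1 := by
  have h := pv_sum_take_set l j hj l.length
  rw [List.take_of_length_le (by simp), List.take_of_length_le (le_refl _), if_pos hj] at h
  rw [List.getD_eq_getElem _ _ hj]
  exact h

theorem pvInsert_spec (t : PvTree) (hwf : pvWF t) (i : Int) (h0 : 0 ≤ i)
    (hlt : i.toNat < pvLeaves t) :
    pvWF (pvInsert t i) ∧ pvLeaves (pvInsert t i) = pvLeaves t ∧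
      pvCnts (pvInsert t i) = (pvCnts t).set i.toNat ((pvCnts t).getD i.toNat 0 + 1) := by
  induction t generalizing i with
  | leaf c =>
    have : i.toNat = 0 := by simp [pvLeaves] at hlt; omega
    simp [pvInsert, pvCnts, pvWF, pvLeaves, this]
  | node tot h l r ihl ihr =>
    obtain ⟨hwl, hwr, hh, htot⟩ := hwf
    simp only [pvLeaves] at hlt
    have hlenl : (pvCnts l).length = pvLeaves l := pvCnts_length l
    have hlenr : (pvCnts r).length = pvLeaves r := pvCnts_length r
    rw [pvInsert]
    by_cases hc : i < h
    · rw [if_pos hc]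
      have hbl : i.toNat < pvLeaves l := by omega
      obtain ⟨w1, w2, w3⟩ := ihl hwl i h0 hbl
      have hgd : (pvCnts l ++ pvCnts r).getD i.toNat 0 = (pvCnts l).getD i.toNat 0 := by
        rw [List.getD_eq_getElem?_getD, List.getD_eq_getElem?_getD,
          List.getElem?_append_left (by omega)]
      refine ⟨⟨w1, hwr, by rw [w2]; exact hh, ?_⟩, ?_, ?_⟩
      · rw [w3, pv_sum_set_add_one (pvCnts l) i.toNat (by omega)]
        omega
      · show pvLeaves (pvInsert l i) + pvLeaves r = pvLeaves l + pvLeaves r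
        omega
      · show pvCnts (pvInsert l i) ++ pvCnts r
            = (pvCnts l ++ pvCnts r).set i.toNat ((pvCnts l ++ pvCnts r).getD i.toNat 0 + 1)
        rw [w3, hgd, List.set_append_left _ _ (by omega)]
    · rw [if_neg hc]
      have hge : h ≤ i := by omega
      have hbl : (i - h).toNat < pvLeaves r := by omega
      obtain ⟨w1, w2, w3⟩ := ihr hwr (i - h) (by omega) hbl
      have hidx : i.toNat - (pvCnts l).length = (i - h).toNat := by omega
      have hgd : (pvCnts l ++ pvCnts r).getD i.toNat 0 = (pvCnts r).getD (i - h).toNat 0 := by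
        rw [List.getD_eq_getElem?_getD, List.getD_eq_getElem?_getD,
          List.getElem?_append_right (by omega), hidx]
      refine ⟨⟨hwl, w1, hh, ?_⟩, ?_, ?_⟩
      · rw [w3, pv_sum_set_add_one (pvCnts r) (i - h).toNat (by omega)]
        omega
      · show pvLeaves l + pvLeaves (pvInsert r (i - h)) = pvLeaves l + pvLeaves r
        omega
      · show pvCnts l ++ pvCnts (pvInsert r (i - h))
            = (pvCnts l ++ pvCnts r).set i.toNat ((pvCnts l ++ pvCnts r).getD i.toNat 0 + 1)
        rw [w3, hgd, List.set_append_right _ _ (by omega), hidx]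

theorem pv_treeCount (I : List Int) (t : PvTree) (hwf : pvWF t)
    (hb : ∀ r ∈ I, 0 ≤ r ∧ r.toNat < pvLeaves t) :
    pvWF (I.foldl pvInsert t) ∧ pvLeaves (I.foldl pvInsert t) = pvLeaves t ∧
      ∀ k, pvQuery (I.foldl pvInsert t) k = pvQuery t k + (I.countP (fun r => decide (r < k)) : Int) := by
  induction I generalizing t with
  | nil => exact ⟨hwf, rfl, fun k => by simp⟩
  | cons i I ih =>
    have hbi := hb i (List.mem_cons_self)
    obtain ⟨w1, w2, w3⟩ := pvInsert_spec t hwf i hbi.1 hbi.2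
    obtain ⟨u1, u2, u3⟩ := ih (pvInsert t i) w1
      (fun r hr => ⟨(hb r (List.mem_cons_of_mem _ hr)).1, w2 ▸ (hb r (List.mem_cons_of_mem _ hr)).2⟩)
    simp only [List.foldl_cons]
    refine ⟨u1, by rw [u2, w2], fun k => ?_⟩
    rw [u3 k, List.countP_cons]
    have hq : pvQuery (pvInsert t i) k = pvQuery t k + if i < k then 1 else 0 := by
      rw [pvQuery_spec _ w1 k, pvQuery_spec _ hwf k, w3,
        List.getD_eq_getElem _ _ (by rw [pvCnts_length]; exact hbi.2)]
      rw [pv_sum_take_set (pvCnts t) i.toNat (by rw [pvCnts_length]; exact hbi.2) k.toNat]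
      have h2 : (if i.toNat < k.toNat then (1:Int) else 0) = if i < k then 1 else 0 := by
        by_cases hik : i < k
        · rw [if_pos (by omega), if_pos hik]
        · rw [if_neg (by omega), if_neg hik]
      rw [h2]
    rw [hq]
    by_cases hik : i < k
    all_goals simp [hik]
    all_goals ring

theorem pvSweep_spec (subj : List (Int × Int)) (x : Int)
    (hsorted : subj.Pairwise (fun a b => a.1 ≤ b.1)) :
    ∀ (sp : Nat) (tree : PvTree), sp ≤ subj.length →
      (∀ q (hq : q < subj.length), q < sp → subj[q].1 ≤ x) →
      pvSweep subj x sp tree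
        = (subj.countP (fun s => decide (s.1 ≤ x)),
           (((subj.drop sp).take (subj.countP (fun s => decide (s.1 ≤ x)) - sp)).map (·.2)).foldl pvInsert tree) := by
  have hcore := pv_sorted_countP (fun s => s.1) subj hsorted (fun s => decide (s.1 ≤ x))
    (fun a b hab hb => by simp at hab hb ⊢; omega)
  have hstop : ∀ (sp : Nat), sp ≤ subj.length →
      (∀ q (hq : q < subj.length), q < sp → subj[q].1 ≤ x) →
      ¬ (sp < subj.length ∧ (subj.getD sp (0, 0)).1 ≤ x) →
      sp = subj.countP (fun s => decide (s.1 ≤ x)) := by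
    intro sp hsp hlt hns
    have hle : sp ≤ subj.countP (fun s => decide (s.1 ≤ x)) := by
      rcases Nat.eq_zero_or_pos sp with rfl | hpos
      · omega
      · have h1 : sp - 1 < subj.length := by omega
        have := (hcore (sp - 1) h1).mp (by simp [hlt (sp - 1) h1 (by omega)])
        omega
    rcases Nat.lt_or_ge sp subj.length with hplen | hplen
    · by_contra hne
      have hlt2 : sp < subj.countP (fun s => decide (s.1 ≤ x)) := by omega
      have := (hcore sp hplen).mpr hlt2
      rw [List.getD_eq_getElem subj (0, 0) hplen] at hns
      simp at this hns
      omega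
    · have : subj.countP (fun s => decide (s.1 ≤ x)) ≤ subj.length := List.countP_le_length
      omega
  have H : ∀ (n sp : Nat) (tree : PvTree), subj.length - sp ≤ n → sp ≤ subj.length →
      (∀ q (hq : q < subj.length), q < sp → subj[q].1 ≤ x) →
      pvSweep subj x sp tree
        = (subj.countP (fun s => decide (s.1 ≤ x)),
           (((subj.drop sp).take (subj.countP (fun s => decide (s.1 ≤ x)) - sp)).map (·.2)).foldl pvInsert tree) := by
    intro n
    induction n with
    | zero =>
      intro sp tree hn hsp hlt
      rw [pvSweep, dif_neg (by omega)]
      have h0 := hstop sp hsp hlt (by omega)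
      rw [← h0]
      simp
    | succ n ih =>
      intro sp tree hn hsp hlt
      rw [pvSweep]
      by_cases hc : sp < subj.length ∧ (subj.getD sp (0, 0)).1 ≤ x
      · rw [dif_pos hc]
        obtain ⟨hsplen, hx⟩ := hc
        rw [List.getD_eq_getElem subj (0, 0) hsplen] at hx ⊢
        have hspc : sp < subj.countP (fun s => decide (s.1 ≤ x)) :=
          (hcore sp hsplen).mp (by simpa using hx)
        rw [ih (sp + 1) _ (by omega) (by omega) (fun q hq hqp => by
          rcases Nat.lt_or_ge q sp with h | h
          · exact hlt q hq h
          · have : q = sp := by omega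
            subst this
            exact hx)]
        congr 1
        rw [List.drop_eq_getElem_cons hsplen]
        have : subj.countP (fun s => decide (s.1 ≤ x)) - sp
            = (subj.countP (fun s => decide (s.1 ≤ x)) - (sp + 1)) + 1 := by omega
        rw [this, List.take_succ_cons, List.map_cons, List.foldl_cons]
      · rw [dif_neg hc]
        have h0 := hstop sp hsp hlt hc
        rw [← h0]
        simp
  intro sp tree hsp hlt
  exact H (subj.length - sp) sp tree (by omega) hsp hlt

theorem pv_mainFold (subj : List (Int × Int)) (thr : List Int) (S : Nat)
    (hsorted : subj.Pairwise (fun a b => a.1 ≤ b.1))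
    (hbnd : ∀ s ∈ subj, 0 ≤ s.2 ∧ s.2.toNat < S) :
    ∀ (items : List (Int × Int)) (sp : Nat) (tree : PvTree) (counts : List Int),
      items.Pairwise (fun a b => a.2 ≤ b.2) →
      sp ≤ subj.length →
      (∀ q (hq : q < subj.length), q < sp → ∀ b ∈ items, subj[q].1 ≤ b.2) →
      tree = (((subj.take sp).map (·.2)).foldl pvInsert (pvBuild S)) →
      (items.foldl (fun (st : Nat × PvTree × List Int) e =>
          let r := pvSweep subj e.2 st.1 st.2.1
          (r.1, r.2, st.2.2.set e.1.toNat ((r.1 : Int) - pvQuery r.2 (thr.getD e.1.toNat 0))))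
        (sp, tree, counts)).2.2
      = items.foldl (fun a e => a.set e.1.toNat
          ((subj.countP (fun s => decide (s.1 ≤ e.2)) : Int)
            - (((subj.filter (fun s => decide (s.1 ≤ e.2))).map (·.2)).countP
                (fun r => decide (r < thr.getD e.1.toNat 0)) : Nat))) counts := by
  have hcore := pv_sorted_countP (fun s => s.1) subj hsorted
  have hleaves : pvLeaves (pvBuild S) = max S 1 := by
    rw [← pvCnts_length, (pvBuild_spec S).2, List.length_replicate]
  intro items
  induction items with
  | nil => intro sp tree counts _ _ _ _; rfl
  | cons e rest ih =>
    intro sp tree counts hpair hsp hpre htree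
    simp only [List.foldl_cons]
    have hsw := pvSweep_spec subj e.2 hsorted sp tree hsp
      (fun q hq hqp => hpre q hq hqp e (List.mem_cons_self))
    have hcm : ∀ a b : Int × Int, a.1 ≤ b.1 → (decide (b.1 ≤ e.2)) = true → (decide (a.1 ≤ e.2)) = true :=
      fun a b hab hb => by simp at hb ⊢; omega
    have hspc : sp ≤ subj.countP (fun s => decide (s.1 ≤ e.2)) := by
      rcases Nat.eq_zero_or_pos sp with rfl | hpos
      · omega
      · have h1 : sp - 1 < subj.length := by omega
        have := (hcore (fun s => decide (s.1 ≤ e.2)) hcm (sp - 1) h1).mp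
          (by simp [hpre (sp - 1) h1 (by omega) e (List.mem_cons_self)])
        omega
    have hcle : subj.countP (fun s => decide (s.1 ≤ e.2)) ≤ subj.length := List.countP_le_length
    have htree' : (pvSweep subj e.2 sp tree).2
        = ((subj.take (subj.countP (fun s => decide (s.1 ≤ e.2)))).map (·.2)).foldl pvInsert (pvBuild S) := by
      rw [hsw]
      simp only [htree]
      rw [← List.foldl_append, ← List.map_append, ← List.take_add]
      have heq : sp + (subj.countP (fun s => decide (s.1 ≤ e.2)) - sp)
          = subj.countP (fun s => decide (s.1 ≤ e.2)) := by omega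
      rw [heq]
    have hbnds : ∀ r ∈ (subj.take (subj.countP (fun s => decide (s.1 ≤ e.2)))).map (·.2),
        0 ≤ r ∧ r.toNat < pvLeaves (pvBuild S) := by
      intro r hr
      obtain ⟨sub, hsub, rfl⟩ := List.mem_map.mp hr
      have := hbnd sub (List.mem_of_mem_take hsub)
      omega
    have htc := pv_treeCount _ (pvBuild S) (pvBuild_spec S).1 hbnds
    have hq0 : ∀ k, pvQuery (pvBuild S) k = 0 := by
      intro k
      rw [pvQuery_spec _ (pvBuild_spec S).1 k, (pvBuild_spec S).2, List.take_replicate]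
      simp
    have hval : ((pvSweep subj e.2 sp tree).1 : Int)
          - pvQuery (pvSweep subj e.2 sp tree).2 (thr.getD e.1.toNat 0)
        = ((subj.countP (fun s => decide (s.1 ≤ e.2)) : Int)
            - (((subj.filter (fun s => decide (s.1 ≤ e.2))).map (·.2)).countP
                (fun r => decide (r < thr.getD e.1.toNat 0)) : Nat)) := by
      rw [htree', hsw]
      simp only
      rw [htc.2.2 (thr.getD e.1.toNat 0), hq0, zero_add,
        pv_filter_eq_take (fun s => s.1) subj hsorted _ hcm]
    rw [ih (pvSweep subj e.2 sp tree).1 (pvSweep subj e.2 sp tree).2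
      (counts.set e.1.toNat (((pvSweep subj e.2 sp tree).1 : Int)
        - pvQuery (pvSweep subj e.2 sp tree).2 (thr.getD e.1.toNat 0)))
      (List.pairwise_cons.mp hpair).2
      (by rw [hsw]; exact hcle)
      (by
        rw [hsw]
        intro q hq hqc b hb
        have h1 : subj[q].1 ≤ e.2 := by
          have := (hcore (fun s => decide (s.1 ≤ e.2)) hcm q hq).mpr hqc
          simpa using this
        have h2 : e.2 ≤ b.2 := (List.pairwise_cons.mp hpair).1 b hb
        omega)
      (by rw [htree', hsw])]
    rw [hval]

theorem pv_countP_congr_getElem {α β : Type} (l₁ : List α) (l₂ : List β)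
    (h : l₁.length = l₂.length) (p : α → Bool) (q : β → Bool)
    (hpq : ∀ j (h1 : j < l₁.length) (h2 : j < l₂.length), p l₁[j] = q l₂[j]) :
    l₁.countP p = l₂.countP q := by
  induction l₁ generalizing l₂ with
  | nil => cases l₂ with
    | nil => rfl
    | cons b t => simp at h
  | cons a t ih =>
    cases l₂ with
    | nil => simp at h
    | cons b t₂ =>
      have h0 := hpq 0 (by simp) (by simp)
      simp only [List.getElem_cons_zero] at h0
      rw [List.countP_cons, List.countP_cons, h0,
        ih t₂ (by simpa using h) (fun j h1 h2 => by
          simpa using hpq (j + 1) (by simpa using h1) (by simpa using h2))]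

-- counting a member's strict predecessors never reaches the whole length
theorem pv_countP_lt_length (l : List Int) (a : Int) (ha : a ∈ l) :
    l.countP (fun v => decide (v < a)) < l.length := by
  rcases Nat.lt_or_ge (l.countP (fun v => decide (v < a))) l.length with h | h
  · exact h
  · have h1 : l.countP (fun v => decide (v < a)) ≤ l.length := List.countP_le_length
    have h2 : l.countP (fun v => decide (v < a)) = l.length := by omega
    have := List.countP_eq_length.mp h2 a ha
    simp at this

-- split a count along a second predicate
theorem pv_countP_split (l : List (Int × Int)) (A B : (Int × Int) → Bool) :
    l.countP A = l.countP (fun s => B s && A s) + l.countP (fun s => !B s && A s) := by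
  rw [← List.countP_filter, ← List.countP_filter, List.countP_eq_length_filter]
  have := List.length_eq_countP_add_countP (l := l.filter A) B
  simpa using this

-- B's pipeline with every intermediate list named, equal to the per-query counts
theorem pv_B_core (qstart qend sstart send vs rank thr : List Int)
    (subj : List (Int × Int))
    (hq : qstart.length = qend.length) (hs : sstart.length = send.length)
    (hvs : vs = PySem.List.sorted send (fun v => v) false)
    (hrank : rank = ((PySem.List.sorted (PySem.List.enumerate send 0) (fun e => e.2) false).foldl
        (fun (st : Nat × List Int) e =>
          let p := pvAdvance vs e.2 st.1
          (p, st.2.set e.1.toNat (p : Int)))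
        (0, List.replicate sstart.length (0 : Int))).2)
    (hthr : thr = ((PySem.List.sorted (PySem.List.enumerate qstart 0) (fun e => e.2) false).foldl
        (fun (st : Nat × List Int) e =>
          let p := pvAdvance vs e.2 st.1
          (p, st.2.set e.1.toNat (p : Int)))
        (0, List.replicate qstart.length (0 : Int))).2)
    (hsubj : subj = PySem.List.sorted (sstart.zip rank) (fun e => e.1) false) :
    ((PySem.List.sorted (PySem.List.enumerate qend 0) (fun e => e.2) false).foldl
        (fun (st : Nat × PvTree × List Int) e =>
          let r := pvSweep subj e.2 st.1 st.2.1
          (r.1, r.2, st.2.2.set e.1.toNat ((r.1 : Int) - pvQuery r.2 (thr.getD e.1.toNat 0))))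
        (0, pvBuild sstart.length, List.replicate qstart.length (0 : Int))).2.2
      = (qstart.zip qend).map (fun q => ((pvCnt q (sstart.zip send) : Nat) : Int)) := by
  have hvsp : vs.Pairwise (· ≤ ·) := by
    rw [hvs]; simpa using PySem.List.sorted_pairwise (xs := send) (key := fun v => v)
  have hvperm : vs.Perm send := hvs ▸ PySem.List.sorted_perm _ _ _
  have hpairenum : ∀ xs : List Int,
      (PySem.List.sorted (PySem.List.enumerate xs 0) (fun e => e.2) false).Pairwise
        (fun a b => a.2 ≤ b.2) := fun xs => by
    simpa using PySem.List.sorted_pairwise (xs := PySem.List.enumerate xs 0) (key := fun e => e.2)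
  have hrankj : ∀ j (hj : j < send.length),
      rank[j]? = some ((send.countP (fun v => decide (v < send[j])) : Nat) : Int) := by
    intro j hj
    rw [hrank]
    exact pv_rankArr_spec send vs send sstart.length hvperm hvsp j hj (by omega)
  have hrlen : rank.length = sstart.length := by
    rw [hrank, pv_scatter vs hvsp _ 0 _ (hpairenum send) (by omega)
      (by intro q hq' h0 b hb; omega)]
    have := pv_foldl_set_length
      (PySem.List.sorted (PySem.List.enumerate send 0) (fun e => e.2) false)
      (fun e : Int × Int => e.1.toNat)
      (fun e : Int × Int => ((vs.countP (fun v => decide (v < e.2)) : Nat) : Int))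
      (List.replicate sstart.length (0 : Int))
    simpa using this
  have hthrj : ∀ i (hi : i < qstart.length),
      thr[i]? = some ((send.countP (fun v => decide (v < qstart[i])) : Nat) : Int) := by
    intro i hi
    rw [hthr]
    exact pv_rankArr_spec send vs qstart qstart.length hvperm hvsp i hi hi
  have hsubjp : subj.Pairwise (fun a b => a.1 ≤ b.1) := by
    rw [hsubj]
    simpa using PySem.List.sorted_pairwise (xs := sstart.zip rank) (key := fun e => e.1)
  have hsubjperm : subj.Perm (sstart.zip rank) := hsubj ▸ PySem.List.sorted_perm _ _ _
  have hbnd : ∀ s ∈ subj, 0 ≤ s.2 ∧ s.2.toNat < sstart.length := by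
    intro s hsm
    have hz : s ∈ sstart.zip rank := hsubjperm.mem_iff.mp hsm
    have h2 : s.2 ∈ rank := (List.of_mem_zip hz).2
    obtain ⟨j, hjr, hjeq⟩ := List.mem_iff_getElem.mp h2
    have hjs : j < send.length := by omega
    have := hrankj j hjs
    rw [List.getElem?_eq_getElem hjr] at this
    have hval : rank[j] = ((send.countP (fun v => decide (v < send[j])) : Nat) : Int) :=
      Option.some.inj this
    have hb := pv_countP_lt_length send send[j] (List.getElem_mem hjs)
    rw [← hjeq, hval]
    omega
  rw [pv_mainFold subj thr sstart.length hsubjp hbnd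
    (PySem.List.sorted (PySem.List.enumerate qend 0) (fun e => e.2) false)
    0 (pvBuild sstart.length) (List.replicate qstart.length (0 : Int))
    (hpairenum qend) (by omega) (by intro q hq' h0 b hb; omega) (by rfl)]
  have hflen : ∀ (counts : List Int),
      ((PySem.List.sorted (PySem.List.enumerate qend 0) (fun e => e.2) false).foldl
        (fun a e => a.set e.1.toNat
          ((subj.countP (fun s => decide (s.1 ≤ e.2)) : Int)
            - (((subj.filter (fun s => decide (s.1 ≤ e.2))).map (·.2)).countP
                (fun r => decide (r < thr.getD e.1.toNat 0)) : Nat))) counts).length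
        = counts.length := by
    intro counts
    have := pv_foldl_set_length
      (PySem.List.sorted (PySem.List.enumerate qend 0) (fun e => e.2) false)
      (fun e : Int × Int => e.1.toNat)
      (fun e : Int × Int => ((subj.countP (fun s => decide (s.1 ≤ e.2)) : Int)
            - (((subj.filter (fun s => decide (s.1 ≤ e.2))).map (·.2)).countP
                (fun r => decide (r < thr.getD e.1.toNat 0)) : Nat))) counts
    simpa using this
  apply List.ext_getElem
  · rw [hflen]
    simp [hq]
  · intro i h1 h2
    have hiQ : i < qstart.length := by
      rw [hflen] at h1
      simpa using h1
    have hiE : i < qend.length := by omega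
    have he : ((i : Int), qend[i]) ∈ PySem.List.sorted (PySem.List.enumerate qend 0) (fun e => e.2) false := by
      rw [PySem.List.mem_sorted, PySem.List.mem_enumerate_iff]
      exact ⟨i, hiE, by simp⟩
    have hlhs := pv_foldl_set_getElem
      (PySem.List.sorted (PySem.List.enumerate qend 0) (fun e => e.2) false)
      (fun e : Int × Int => e.1.toNat)
      (fun e : Int × Int => ((subj.countP (fun s => decide (s.1 ≤ e.2)) : Int)
            - (((subj.filter (fun s => decide (s.1 ≤ e.2))).map (·.2)).countP
                (fun r => decide (r < thr.getD e.1.toNat 0)) : Nat)))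
      (List.replicate qstart.length (0 : Int))
      ((i : Int), qend[i]) he (by simpa using hiQ) (pv_sorted_enum_nodup qend)
    simp only at hlhs
    rw [show ((i : Int), qend[i]).1.toNat = i by simp] at hlhs
    rw [List.getElem?_eq_getElem h1] at hlhs
    have hlhs2 := Option.some.inj hlhs
    rw [hlhs2]
    have hthrd : thr.getD i 0 = ((send.countP (fun v => decide (v < qstart[i])) : Nat) : Int) := by
      rw [List.getD_eq_getElem?_getD, hthrj i hiQ]
      rfl
    have hzlen : (sstart.zip rank).length = (sstart.zip send).length := by
      simp [hrlen, hs]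
    have hc1 : subj.countP (fun s => decide (s.1 ≤ qend[i]))
        = (sstart.zip send).countP (fun s => decide (s.1 ≤ qend[i])) := by
      rw [List.Perm.countP_eq _ hsubjperm]
      apply pv_countP_congr_getElem _ _ hzlen
      intro j hj1 hj2
      have hjs2 : j < sstart.length := by simp at hj1; omega
      have hjr : j < rank.length := by simp at hj1; omega
      have hjd : j < send.length := by omega
      rw [List.getElem_zip, List.getElem_zip]
    have hc2 : ((subj.filter (fun s => decide (s.1 ≤ qend[i]))).map (·.2)).countP
          (fun r => decide (r < thr.getD i 0))
        = (sstart.zip send).countP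
            (fun s => decide (s.2 < qstart[i]) && decide (s.1 ≤ qend[i])) := by
      rw [List.countP_map, List.countP_filter, List.Perm.countP_eq _ hsubjperm]
      apply pv_countP_congr_getElem _ _ hzlen
      intro j hj1 hj2
      have hjs2 : j < sstart.length := by simp at hj1; omega
      have hjr : j < rank.length := by simp at hj1; omega
      have hjd : j < send.length := by omega
      have hval : rank[j] = ((send.countP (fun v => decide (v < send[j])) : Nat) : Int) := by
        have := hrankj j hjd
        rw [List.getElem?_eq_getElem hjr] at this
        exact Option.some.inj this
      simp only [Function.comp]
      rw [List.getElem_zip, List.getElem_zip]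
      simp only
      rw [hval, hthrd]
      have hiff : (((send.countP (fun v => decide (v < send[j])) : Nat) : Int)
            < ((send.countP (fun v => decide (v < qstart[i])) : Nat) : Int))
          ↔ send[j] < qstart[i] := by
        rw [Nat.cast_lt]
        exact pv_rank_lt send send[j] qstart[i] (List.getElem_mem hjd)
      by_cases hcase : send[j] < qstart[i]
      · rw [decide_eq_true (hiff.mpr hcase), decide_eq_true hcase]
      · rw [decide_eq_false (fun hcon => hcase (hiff.mp hcon)), decide_eq_false hcase]
    have hsplit := pv_countP_split (sstart.zip send)
      (fun s => decide (s.1 ≤ qend[i]))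
      (fun s => decide (s.2 < qstart[i]))
    have hpv : pvCnt (qstart[i], qend[i]) (sstart.zip send)
        = (sstart.zip send).countP
            (fun s => !decide (s.2 < qstart[i]) && decide (s.1 ≤ qend[i])) := by
      unfold pvCnt
      apply List.countP_congr
      intro s _
      by_cases hx : s.2 < qstart[i] <;> by_cases hy : s.1 ≤ qend[i] <;>
        simp [hx, hy]
      all_goals omega
    have hrhs : ((qstart.zip qend).map
        (fun q => ((pvCnt q (sstart.zip send) : Nat) : Int)))[i]
        = ((pvCnt (qstart[i], qend[i]) (sstart.zip send) : Nat) : Int) := by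
      rw [List.getElem_map, List.getElem_zip]
    rw [hrhs, hc1, hc2, hpv]
    omega

-- ---- B-side characterisation ----
theorem pv_B_eq (qstart qend sstart send : List Int)
    (hq : qstart.length = qend.length) (hs : sstart.length = send.length) :
    count_overlaps_alt qstart qend sstart send
      = (qstart.zip qend).map (fun q => ((pvCnt q (sstart.zip send) : Nat) : Int)) := by
  unfold count_overlaps_alt
  rw [if_neg (fun hne => hne hq), if_neg (fun hne => hne hs)]
  exact pv_B_core qstart qend sstart send _ _ _ _ hq hs rfl rfl rfl rfl

theorem pv_equal (qstart qend sstart send : List Int)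
    (hq : qstart.length = qend.length) (hs : sstart.length = send.length) :
    count_overlaps qstart qend sstart send = count_overlaps_alt qstart qend sstart send := by
  rw [pv_A_eq qstart qend sstart send hq hs, pv_B_eq qstart qend sstart send hq hs]

-- ===== VERDICT (by name: the statement is the Claim_ definition above) =====
theorem count_overlaps_spec : Claim_equal_count_overlaps := by
  intro qstart qend sstart send _ hpre
  unfold Spec_count_overlaps
  exact pv_equal qstart qend sstart send hpre.1 hpre.2
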